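-- pv_equiv track=rewrite | github.com/uridog/server_almost_final | server.py | check_for_special_word
-- ===== SOURCE A (Python) =====
-- def check_for_special_word(single_category_list):
--     special = True
--     counter = 0
--     for i in range(3):
--         if single_category_list[i] != "":
--             for x in range(3):
--                 if x != i:
--                     if single_category_list[x] != "":
--                         special = False
--             if special is True:
--                 return counter
--         counter += 1
--         special = True
--     return -1
-- ===== SOURCE B (Python) =====
-- def check_for_special_word(single_category_list):
--     idx = -1
--     count = 0
--     for i in range(3):
--         if single_category_list[i] != "":
--             idx = i
--             count += 1
--     return idx if count == 1 else -1
-- ===== Notes on version B (the rewrite author's own statement) =====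
-- stated objective: simpler
-- what changed: B replaces A's nested scan-with-early-return (for each non-empty slot, rescan the other two) by one linear pass counting non-empty slots and remembering the last such index, returning it iff the count is exactly 1.
import Mathlib
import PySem

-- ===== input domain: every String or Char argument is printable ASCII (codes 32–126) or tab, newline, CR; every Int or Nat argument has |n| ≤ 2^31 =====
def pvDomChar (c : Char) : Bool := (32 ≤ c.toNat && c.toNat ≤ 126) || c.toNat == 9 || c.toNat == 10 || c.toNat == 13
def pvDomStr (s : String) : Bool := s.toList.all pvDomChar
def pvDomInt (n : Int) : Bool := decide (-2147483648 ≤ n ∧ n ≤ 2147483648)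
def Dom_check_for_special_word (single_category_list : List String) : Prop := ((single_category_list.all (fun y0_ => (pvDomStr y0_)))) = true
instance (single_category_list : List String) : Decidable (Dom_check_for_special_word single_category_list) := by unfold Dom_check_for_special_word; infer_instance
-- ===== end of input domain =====

-- B: one pass over slots 0..2 counting non-empties and remembering the last index (simpler decomposition, no nested rescan).


-- ===== PORT A =====
-- inner 'for x in range(3)' of A: recheck the other two slots
def cfswInner (xs : List String) (i : Int) : Bool :=
  (PySem.List.pyRange 0 3 1).foldl (fun special x =>
    if x ≠ i then
      if ((PySem.List.pyGet? xs x).getD "") ≠ "" then false else special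
    else special) true

-- outer 'for i in range(3)' with early return; counter tracked as in A
def cfswLoop (xs : List String) : List Int → Int → Int
  | [], _ => -1
  | i :: rest, counter =>
    if ((PySem.List.pyGet? xs i).getD "") ≠ "" ∧ cfswInner xs i = true then counter
    else cfswLoop xs rest (counter + 1)

def check_for_special_word (single_category_list : List String) : Int :=
  cfswLoop single_category_list (PySem.List.pyRange 0 3 1) 0

-- ===== PORT B =====
def check_for_special_word_alt (single_category_list : List String) : Int :=
  let st := (PySem.List.pyRange 0 3 1).foldl (fun (p : Int × Int) i =>
    if ((PySem.List.pyGet? single_category_list i).getD "") ≠ "" then (i, p.2 + 1) else p)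
    ((-1 : Int), (0 : Int))
  if st.2 = 1 then st.1 else -1

-- ===== PRECONDITION & SPEC =====
-- A indexes slots 0..2 unconditionally, so it raises IndexError on lists shorter than 3
def Pre_check_for_special_word (single_category_list : List String) : Prop :=
  3 ≤ single_category_list.length
instance (single_category_list : List String) : Decidable (Pre_check_for_special_word single_category_list) := by unfold Pre_check_for_special_word; infer_instance
def pvWitness_check_for_special_word : List String := ["a", "", ""]

def Spec_check_for_special_word (single_category_list : List String) (out : Int) : Prop := out = check_for_special_word_alt single_category_list
instance (single_category_list : List String) (out : Int) : Decidable (Spec_check_for_special_word single_category_list out) := by unfold Spec_check_for_special_word; infer_instance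

-- ===== CLAIM (what is proved, stated in full; the proofs are below) =====
def Claim_equal_check_for_special_word : Prop := ∀ (single_category_list : List String), Dom_check_for_special_word single_category_list → Pre_check_for_special_word single_category_list → Spec_check_for_special_word single_category_list (check_for_special_word single_category_list)

-- ===== LEMMAS AND PROOFS =====

-- ===== VERDICT (by name: the statement is the Claim_ definition above) =====
theorem check_for_special_word_spec : Claim_equal_check_for_special_word := by
  intro xs _ hpre
  obtain ⟨a, b, c, rest, rfl⟩ : ∃ a b c rest, xs = a :: b :: c :: rest := by
    match xs, hpre with
    | a :: b :: c :: rest, _ => exact ⟨a, b, c, rest, rfl⟩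
  unfold Spec_check_for_special_word check_for_special_word check_for_special_word_alt
  have hR : PySem.List.pyRange 0 3 1 = [0, 1, 2] := by decide
  have h0 : PySem.List.pyGet? (a :: b :: c :: rest) 0 = some a := by
    rw [show (0 : Int) = ((0 : Nat) : Int) from rfl, PySem.List.pyGet?_natCast]; rfl
  have h1 : PySem.List.pyGet? (a :: b :: c :: rest) 1 = some b := by
    rw [show (1 : Int) = ((1 : Nat) : Int) from rfl, PySem.List.pyGet?_natCast]; rfl
  have h2 : PySem.List.pyGet? (a :: b :: c :: rest) 2 = some c := by
    rw [show (2 : Int) = ((2 : Nat) : Int) from rfl, PySem.List.pyGet?_natCast]; rfl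
  simp only [cfswLoop, cfswInner, hR, List.foldl, h0, h1, h2, Option.getD_some]
  by_cases ha : a = "" <;> by_cases hb : b = "" <;> by_cases hc : c = "" <;>
    simp [ha, hb, hc]
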